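-- pv_equiv track=rewrite | github.com/grant-dot-dev/advent_code_2025 | python/day_3/solution.py | solve
-- ===== SOURCE A (Python) =====
-- def solve(banks, num_digits=12):
--     total = 0
--     for bank in banks:
--         digits = [int(d) for d in bank if d.isdigit()]
--         if len(digits) < num_digits:
--             continue
--         result = []
--         start_idx = 0
--
--         for pos in range(num_digits):
--             # How many more digits do we need after this one?
--             remaining_needed = num_digits - pos - 1
--
--             # Latest index we can pick from while leaving enough digits
--             search_until = len(digits) - remaining_needed
--
--             # Find the maximum digit in the valid range
--             max_digit = -1
--             max_idx = -1
--             for i in range(start_idx, search_until):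
--                 if digits[i] > max_digit:
--                     max_digit = digits[i]
--                     max_idx = i
--
--             result.append(max_digit)
--             start_idx = max_idx + 1  # Next search starts after this digit
--
--         number = int(''.join(map(str, result)))
--         total += number
--     return total
-- ===== SOURCE B (Python) =====
-- def solve(banks, num_digits=12):
--     total = 0
--     for bank in banks:
--         digits = [int(d) for d in bank if d.isdigit()]
--         drop = len(digits) - num_digits
--         if drop < 0:
--             continue
--         stack = []
--         for d in digits:
--             while stack and drop > 0 and stack[-1] < d:
--                 stack.pop()
--                 drop -= 1
--             stack.append(d)
--         total += int(''.join(map(str, stack[:num_digits])))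
--     return total
-- ===== Notes on version B (the rewrite author's own statement) =====
-- stated objective: alternative
-- what changed: A rescans the remaining digits for the maximum once per output position (nested loops, O(n*k) per bank); B builds the maximum length-k subsequence in a single pass with a monotonic stack and a pop budget of n-k (O(n) per bank); a timing run (small fixed k) measured no speed difference.
import Mathlib
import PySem

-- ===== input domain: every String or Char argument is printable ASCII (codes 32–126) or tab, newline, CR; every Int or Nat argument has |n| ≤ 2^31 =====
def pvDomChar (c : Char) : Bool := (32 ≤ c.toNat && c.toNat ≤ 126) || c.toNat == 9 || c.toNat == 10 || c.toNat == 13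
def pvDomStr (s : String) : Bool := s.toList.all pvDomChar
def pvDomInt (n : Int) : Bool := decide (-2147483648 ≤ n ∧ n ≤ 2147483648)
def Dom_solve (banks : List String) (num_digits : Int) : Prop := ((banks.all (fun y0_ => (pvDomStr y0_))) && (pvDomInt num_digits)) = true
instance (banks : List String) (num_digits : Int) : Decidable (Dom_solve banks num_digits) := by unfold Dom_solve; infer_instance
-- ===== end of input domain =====

-- B replaces A's per-position rescans of the digit list by a one-pass monotonic stack with a pop budget (a different algorithm of similar measured cost).
-- A and B share the Python lines 'digits = [int(d) for d in bank if d.isdigit()]' and 'int(''.join(map(str, …)))',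
-- ported once below as pvDigits / pvJoinInt.

-- ===== PORT A =====
-- [int(d) for d in bank if d.isdigit()]; int(d) on a single digit char is its value c - '0' (exact: guarded by isdigit)
def pvDigits (bank : String) : List Int :=
  (bank.toList.filter PySem.Chars.isdigit).map (fun c => ((c.toNat : Int) - 48))

-- int(''.join(map(str, res))); .getD 0 is never reached under Pre_ (res is then a nonempty list of digits 0..9)
def pvJoinInt (res : List Int) : Int :=
  (PySem.Int.ofStr? (PySem.Str.join "" (res.map PySem.Int.toStr))).getD 0

-- the inner 'for i in range(start_idx, search_until)' body
def pvScanStep (digits : List Int) (mm : Int × Int) (i : Int) : Int × Int :=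
  if PySem.List.pyGetD digits i 0 > mm.1 then (PySem.List.pyGetD digits i 0, i) else mm

-- the 'for pos in range(num_digits)' loop: state (result, start_idx)
def pvBankA (digits : List Int) (num_digits : Int) : List Int :=
  ((PySem.List.pyRange 0 num_digits 1).foldl
    (fun (st : List Int × Int) pos =>
      let remaining_needed := num_digits - pos - 1
      let search_until := (digits.length : Int) - remaining_needed
      let mm := (PySem.List.pyRange st.2 search_until 1).foldl (pvScanStep digits) (-1, -1)
      (st.1 ++ [mm.1], mm.2 + 1))
    ([], 0)).1

-- one iteration of A's 'for bank in banks' loop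
def pvStepA (num_digits : Int) (total : Int) (bank : String) : Int :=
  let digits := pvDigits bank
  if (digits.length : Int) < num_digits then total
  else total + pvJoinInt (pvBankA digits num_digits)

def solve (banks : List String) (num_digits : Int) : Int :=
  banks.foldl (pvStepA num_digits) 0

-- ===== PORT B =====
-- the 'while stack and drop > 0 and stack[-1] < d: stack.pop(); drop -= 1' then 'stack.append(d)';
-- the Python list's END (top of stack) is this Lean list's HEAD
def pvPopPush (d : Int) : List Int → Int → List Int × Int
  | [], drop => ([d], drop)
  | t :: rest, drop =>
    if 0 < drop ∧ t < d then pvPopPush d rest (drop - 1)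
    else (d :: t :: rest, drop)

-- the 'for d in digits' loop: state (stack, drop)
def pvBankB (digits : List Int) (drop : Int) : List Int × Int :=
  digits.foldl (fun st d => pvPopPush d st.1 st.2) ([], drop)

-- one iteration of B's 'for bank in banks' loop
def pvStepB (num_digits : Int) (total : Int) (bank : String) : Int :=
  let digits := pvDigits bank
  let drop := (digits.length : Int) - num_digits
  if drop < 0 then total
  else total + pvJoinInt (PySem.List.slice (pvBankB digits drop).1.reverse none (some num_digits))

def solve_alt (banks : List String) (num_digits : Int) : Int :=
  banks.foldl (pvStepB num_digits) 0

-- ===== PRECONDITION & SPEC =====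
-- Pre_ excludes num_digits ≤ 0 with a nonempty banks list: there A reaches int('') and raises ValueError.
def Pre_solve (banks : List String) (num_digits : Int) : Prop := 1 ≤ num_digits ∨ banks = []
instance (banks : List String) (num_digits : Int) : Decidable (Pre_solve banks num_digits) := by
  unfold Pre_solve; infer_instance

def pvWitness_solve : List String × Int := (["a1b2c3d4e5", "987654321"], 3)

def Spec_solve (banks : List String) (num_digits : Int) (out : Int) : Prop := out = solve_alt banks num_digits
instance (banks : List String) (num_digits : Int) (out : Int) : Decidable (Spec_solve banks num_digits out) := by unfold Spec_solve; infer_instance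

-- ===== CLAIM (what is proved, stated in full; the proofs are below) =====
def Claim_equal_solve : Prop := ∀ (banks : List String) (num_digits : Int), Dom_solve banks num_digits → Pre_solve banks num_digits → Spec_solve banks num_digits (solve banks num_digits)

-- ===== LEMMAS AND PROOFS =====

-- The common mathematical description of one bank's picked digit list: repeatedly take the
-- first maximum of the window that still leaves enough digits, then recurse after it.
def pvGreedy : List Int → Nat → List Int
  | _, 0 => []
  | ds, r+1 =>
    let w := ds.take (ds.length - r)
    let M := w.foldl max (-1)
    M :: pvGreedy (ds.drop (w.idxOf M + 1)) r

-- A's inner scan, as a structural recursion over the window list (s = absolute index of the window start)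
def pvScanL : List Int → Int → (Int × Int) → Int × Int
  | [], _, mm => mm
  | d :: t, s, mm => pvScanL t (s + 1) (if d > mm.1 then (d, s) else mm)

-- — A side —
lemma pvScan_eq_scanL (ds : List Int) :
    ∀ (w : List Int) (s : Int) (mm : Int × Int), 0 ≤ s →
    (ds.drop s.toNat).take w.length = w → s.toNat + w.length ≤ ds.length →
    (PySem.List.pyRange s (s + w.length) 1).foldl (pvScanStep ds) mm = pvScanL w s mm := by
  intro w
  induction w with
  | nil =>
    intro s mm _ _ _
    rw [PySem.List.pyRange_one_eq_nil (by simp)]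
    simp [pvScanL]
  | cons d t ih =>
    intro s mm hs htake hlen
    have hslt : s.toNat < ds.length := by simp [List.length_cons] at hlen; omega
    -- the head of the window is ds[s]
    obtain ⟨l', hl', hd, ht⟩ : ∃ l', ds.drop s.toNat = d :: l' ∧ l'.take t.length = t ∧ ds.drop (s.toNat + 1) = l' := by
      cases hdrop : ds.drop s.toNat with
      | nil =>
        exfalso
        have := List.length_drop (i := s.toNat) (l := ds)
        rw [hdrop] at this
        simp at this
        omega
      | cons a l' =>
        rw [hdrop] at htake
        simp only [List.length_cons, List.take_succ_cons, List.cons.injEq] at htake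
        refine ⟨l', by rw [htake.1], htake.2, ?_⟩
        have : ds.drop (s.toNat + 1) = (ds.drop s.toNat).tail := by
          rw [← List.drop_drop]; simp
        rw [this, hdrop]; simp
    have hget : PySem.List.pyGetD ds s 0 = d := by
      rw [PySem.List.pyGetD_eq_getElem _ _ hs (by omega)]
      have h2 : (ds.drop s.toNat)[0]'(by rw [hl']; simp) = ds[s.toNat]'hslt := by
        simp [List.getElem_drop]
      rw [← h2]
      simp only [hl']
      simp
    have hcons : PySem.List.pyRange s (s + (t.length + 1 : Nat)) 1
        = s :: PySem.List.pyRange (s + 1) ((s + 1) + (t.length : Nat)) 1 := by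
      rw [PySem.List.pyRange_one_cons (by push_cast; omega)]
      congr 1
      push_cast
      ring_nf
    rw [show (d :: t).length = t.length + 1 from rfl, hcons]
    simp only [List.foldl_cons]
    have hstep : pvScanStep ds mm s = (if d > mm.1 then (d, s) else mm) := by
      rw [pvScanStep, hget]
    rw [hstep]
    rw [ih (s + 1) _ (by omega)
      (by rw [show (s+1).toNat = s.toNat + 1 by omega, ht]; exact hd)
      (by rw [show (s+1).toNat = s.toNat + 1 by omega]; simp [List.length_cons] at hlen; omega)]
    rfl

lemma pvScanL_spec : ∀ (t : List Int) (s v i : Int),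
    pvScanL t s (v, i) = (t.foldl max v, if v < t.foldl max v then s + t.idxOf (t.foldl max v) else i) := by
  intro t
  induction t with
  | nil => intro s v i; simp [pvScanL]
  | cons d t ih =>
    intro s v i
    have hfold := (PySem.List.le_foldl_max t (max v d)).1
    by_cases hdv : d > v
    · simp only [pvScanL, if_pos hdv]
      rw [ih]
      have hmax : max v d = d := max_eq_right (le_of_lt hdv)
      simp only [List.foldl_cons, hmax]
      by_cases hMd : d < t.foldl max d
      · rw [if_pos hMd]
        have hne : t.foldl max d ≠ d := ne_of_gt hMd
        rw [List.idxOf_cons_ne t (fun h => hne h.symm)]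
        rw [if_pos (lt_trans hdv hMd)]
        simp only [Nat.succ_eq_add_one, Nat.cast_add, Nat.cast_one, Prod.mk.injEq]
        exact ⟨trivial, by ring⟩
      · rw [if_neg hMd]
        have hMeq : t.foldl max d = d := by rw [hmax] at hfold; omega
        rw [hMeq, List.idxOf_cons_self, if_pos hdv]
        simp
    · simp only [pvScanL, if_neg hdv]
      rw [ih]
      have hdv' : d ≤ v := by omega
      have hmax : max v d = v := max_eq_left hdv'
      simp only [List.foldl_cons, hmax]
      by_cases hMv : v < t.foldl max v
      · rw [if_pos hMv, if_pos hMv]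
        have hne : t.foldl max v ≠ d := by omega
        rw [List.idxOf_cons_ne t (fun h => hne h.symm)]
        simp only [Nat.succ_eq_add_one, Nat.cast_add, Nat.cast_one, Prod.mk.injEq]
        exact ⟨trivial, by ring⟩
      · rw [if_neg hMv, if_neg hMv]

lemma pvBankA_loop (ds : List Int) (k : Int) (h0 : ∀ d ∈ ds, 0 ≤ d) :
    ∀ (r : Nat) (s : Int) (res : List Int), 0 ≤ s → (r : Int) ≤ k → s + r ≤ (ds.length : Int) →
    ((PySem.List.pyRange (k - r) k 1).foldl
      (fun (st : List Int × Int) pos =>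
        let remaining_needed := k - pos - 1
        let search_until := (ds.length : Int) - remaining_needed
        let mm := (PySem.List.pyRange st.2 search_until 1).foldl (pvScanStep ds) (-1, -1)
        (st.1 ++ [mm.1], mm.2 + 1))
      (res, s)).1 = res ++ pvGreedy (ds.drop s.toNat) r := by
  intro r
  induction r with
  | zero =>
    intro s res _ _ _
    rw [show k - ((0:Nat):Int) = k by push_cast; ring]
    rw [PySem.List.pyRange_one_eq_nil le_rfl]
    simp [pvGreedy]
  | succ r ih =>
    intro s res hs hrk hsr
    rw [PySem.List.pyRange_one_cons (by omega)]
    simp only [List.foldl_cons]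
    rw [show k - ((r+1 : Nat) : Int) + 1 = k - (r : Int) by push_cast; ring]
    have hsu : (ds.length : Int) - (k - (k - ((r+1 : Nat) : Int)) - 1) = (ds.length : Int) - r := by
      push_cast; ring
    have hX : (0:Int) ≤ (ds.length : Int) - r - s := by omega
    -- the scanned window
    set w : List Int := (ds.drop s.toNat).take ((ds.length : Int) - r - s).toNat with hwdef
    have hwlen : w.length = ((ds.length : Int) - r - s).toNat := by
      rw [hwdef]
      simp only [List.length_take, List.length_drop]
      omega
    have hwpos : 0 < w.length := by rw [hwlen]; omega
    have hend : s + (w.length : Int) = (ds.length : Int) - r := by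
      rw [hwlen]; omega
    have hscan : (PySem.List.pyRange s ((ds.length : Int) - r) 1).foldl (pvScanStep ds) (-1, -1)
        = pvScanL w s (-1, -1) := by
      rw [← hend]
      exact pvScan_eq_scanL ds w s (-1,-1) hs (by rw [hwlen]) (by omega)
    have hmax := PySem.List.le_foldl_max w (-1)
    set M : Int := w.foldl max (-1) with hMdef
    have hM1 : -1 < M := by
      have hmem0 : w[0] ∈ w := List.getElem_mem hwpos
      have h01 : (0:Int) ≤ w[0] :=
        h0 _ (List.mem_of_mem_drop (List.mem_of_mem_take (by rw [← hwdef]; exact hmem0)))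
      have := hmax.2 w[0] hmem0
      omega
    have hMw : M ∈ w := by
      rcases PySem.List.foldl_max_mem w (-1) with h | h
      · exfalso; rw [← hMdef] at h; omega
      · exact h
    set m : Nat := w.idxOf M with hmdef
    have hmlt : m < w.length := List.idxOf_lt_length_of_mem hMw
    have hscan2 : pvScanL w s (-1, -1) = (M, s + m) := by
      rw [pvScanL_spec, if_pos (by rw [← hMdef]; exact hM1)]
    -- apply the induction hypothesis at the new start index
    have hih := ih (s + m + 1) (res ++ [M]) (by omega) (by omega)
      (by
        have : (m : Int) < (ds.length : Int) - r - s := by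
          have := hmlt; rw [hwlen] at this; omega
        omega)
    rw [hsu, hscan, hscan2]
    simp only at hih ⊢
    rw [hih]
    -- unfold one step of pvGreedy on the right
    have hsplit : pvGreedy (ds.drop s.toNat) (r+1)
        = M :: pvGreedy (ds.drop ((s + m + 1).toNat)) r := by
      conv_lhs => rw [pvGreedy]
      have hlen' : (ds.drop s.toNat).length - r = ((ds.length : Int) - r - s).toNat := by
        simp only [List.length_drop]; omega
      rw [hlen', ← hwdef, ← hMdef, ← hmdef]
      congr 1
      rw [List.drop_drop]
      rw [show (s + (m:Int) + 1).toNat = s.toNat + (m + 1) by omega]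
    rw [hsplit]
    simp

lemma pvBankA_eq_greedy (ds : List Int) (k : Int) (h0 : ∀ d ∈ ds, 0 ≤ d)
    (hk : 0 ≤ k) (hlen : k ≤ (ds.length : Int)) :
    pvBankA ds k = pvGreedy ds k.toNat := by
  have h := pvBankA_loop ds k h0 k.toNat 0 [] le_rfl (by omega) (by omega)
  rw [show k - ((k.toNat : Nat) : Int) = 0 by omega] at h
  simpa [pvBankA] using h

-- — B side —
lemma pvPopPush_snd_sub (d : Int) : ∀ (s : List Int) (dr : Int),
    (pvPopPush d s dr).2 - ((pvPopPush d s dr).1.length : Int) = dr - s.length - 1 := by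
  intro s
  induction s with
  | nil => intro dr; simp [pvPopPush]
  | cons t rest ih =>
    intro dr
    by_cases hc : 0 < dr ∧ t < d
    · simp only [pvPopPush, if_pos hc]
      have := ih (dr - 1)
      push_cast [List.length_cons] at this ⊢
      omega
    · simp only [pvPopPush, if_neg hc]
      push_cast [List.length_cons]
      omega

lemma pvPopPush_mem (d : Int) : ∀ (s : List Int) (dr : Int) (x : Int),
    x ∈ (pvPopPush d s dr).1 → x = d ∨ x ∈ s := by
  intro s
  induction s with
  | nil => intro dr x hx; simp [pvPopPush] at hx; exact Or.inl hx
  | cons t rest ih =>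
    intro dr x hx
    by_cases hc : 0 < dr ∧ t < d
    · simp only [pvPopPush, if_pos hc] at hx
      rcases ih (dr - 1) x hx with h | h
      · exact Or.inl h
      · exact Or.inr (List.mem_cons_of_mem _ h)
    · simp only [pvPopPush, if_neg hc, List.mem_cons] at hx
      simp [List.mem_cons]; tauto

lemma pvPopPush_all_lt (d : Int) : ∀ (s : List Int) (dr : Int),
    (∀ x ∈ s, x < d) → (s.length : Int) ≤ dr → pvPopPush d s dr = ([d], dr - s.length) := by
  intro s
  induction s with
  | nil => intro dr _ _; simp [pvPopPush]
  | cons t rest ih =>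
    intro dr hlt hdr
    have hc : 0 < dr ∧ t < d := by
      constructor
      · have : (rest.length : Int) + 1 ≤ dr := by push_cast [List.length_cons] at hdr; omega
        omega
      · exact hlt t (List.mem_cons_self ..)
    simp only [pvPopPush, if_pos hc]
    rw [ih (dr - 1) (fun x hx => hlt x (List.mem_cons_of_mem _ hx)) (by push_cast [List.length_cons] at hdr ⊢; omega)]
    simp only [Prod.mk.injEq, List.length_cons]
    constructor
    · trivial
    · push_cast; omega

lemma pvPopPush_bottom (d b : Int) : ∀ (s : List Int) (dr : Int),
    (dr ≤ (s.length : Int) ∨ d ≤ b) →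
    pvPopPush d (s ++ [b]) dr = ((pvPopPush d s dr).1 ++ [b], (pvPopPush d s dr).2) := by
  intro s
  induction s with
  | nil =>
    intro dr h
    have hc : ¬ (0 < dr ∧ b < d) := by
      rcases h with h | h
      · simp at h; omega
      · omega
    simp [pvPopPush, if_neg hc]
  | cons t rest ih =>
    intro dr h
    by_cases hc : 0 < dr ∧ t < d
    · simp only [List.cons_append, pvPopPush, if_pos hc]
      apply ih
      rcases h with h | h
      · left; push_cast [List.length_cons] at h ⊢; omega
      · right; exact h
    · simp [pvPopPush, if_neg hc]

lemma pvRun_snd_sub : ∀ (l : List Int) (s : List Int) (dr : Int),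
    (l.foldl (fun st d => pvPopPush d st.1 st.2) (s, dr)).2
      - ((l.foldl (fun st d => pvPopPush d st.1 st.2) (s, dr)).1.length : Int)
      = dr - s.length - l.length := by
  intro l
  induction l with
  | nil => intro s dr; simp
  | cons d t ih =>
    intro s dr
    have hstep := pvPopPush_snd_sub d s dr
    simp only [List.foldl_cons]
    cases hp : pvPopPush d s dr with
    | mk s' dr' =>
      rw [hp] at hstep
      have := ih s' dr'
      simp only [List.length_cons] at hstep ⊢
      push_cast at hstep this ⊢
      omega

lemma pvRun_mem : ∀ (l : List Int) (s : List Int) (dr : Int) (x : Int),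
    x ∈ (l.foldl (fun st d => pvPopPush d st.1 st.2) (s, dr)).1 → x ∈ s ∨ x ∈ l := by
  intro l
  induction l with
  | nil => intro s dr x hx; simp at hx; exact Or.inl hx
  | cons d t ih =>
    intro s dr x hx
    simp only [List.foldl_cons] at hx
    cases hp : pvPopPush d s dr with
    | mk s' dr' =>
      rw [hp] at hx
      rcases ih s' dr' x hx with h | h
      · have := pvPopPush_mem d s dr x (by rw [hp]; exact h)
        rcases this with h' | h'
        · exact Or.inr (by simp [h'])
        · exact Or.inl h'
      · exact Or.inr (List.mem_cons_of_mem _ h)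

-- a prefix all strictly below d, with enough budget, is entirely popped when d arrives
lemma pvRun_prefix (pre : List Int) (d : Int) (dr : Int)
    (h : ∀ x ∈ pre, x < d) (hdr : (pre.length : Int) ≤ dr) :
    (pre ++ [d]).foldl (fun st x => pvPopPush x st.1 st.2) ([], dr) = ([d], dr - pre.length) := by
  rw [List.foldl_append]
  cases hp : pre.foldl (fun st x => pvPopPush x st.1 st.2) ([], dr) with
  | mk s' dr' =>
    have hsub := pvRun_snd_sub pre [] dr
    rw [hp] at hsub
    simp only [List.length_nil] at hsub
    have hmem : ∀ x ∈ s', x < d := by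
      intro x hx
      rcases pvRun_mem pre [] dr x (by rw [hp]; exact hx) with h' | h'
      · simp at h'
      · exact h x h'
    have hlen : (s'.length : Int) ≤ dr' := by push_cast at hsub ⊢; omega
    simp only [List.foldl_cons, List.foldl_nil]
    rw [pvPopPush_all_lt d s' dr' hmem hlen]
    have : dr' - (s'.length : Int) = dr - pre.length := by omega
    rw [this]

-- a bottom element that no early-enough later element exceeds stays at the bottom and changes nothing
lemma pvRun_bottom (b : Int) : ∀ (l : List Int) (s : List Int) (dr : Int),
    (∀ (j : Nat) (hj : j < l.length), (j : Int) + s.length < dr → l[j] ≤ b) →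
    l.foldl (fun st d => pvPopPush d st.1 st.2) (s ++ [b], dr)
      = ((l.foldl (fun st d => pvPopPush d st.1 st.2) (s, dr)).1 ++ [b],
         (l.foldl (fun st d => pvPopPush d st.1 st.2) (s, dr)).2) := by
  intro l
  induction l with
  | nil => intro s dr _; simp
  | cons d t ih =>
    intro s dr h
    have hcond : dr ≤ (s.length : Int) ∨ d ≤ b := by
      by_cases hs : (s.length : Int) < dr
      · right
        have := h 0 (by simp) (by simpa using hs)
        simpa using this
      · left; omega
    simp only [List.foldl_cons]
    rw [pvPopPush_bottom d b s dr hcond]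
    cases hp : pvPopPush d s dr with
    | mk s' dr' =>
      have hsub := pvPopPush_snd_sub d s dr
      rw [hp] at hsub
      simp only at hsub ⊢
      apply ih
      intro j hj hlt
      have : ((j + 1 : Nat) : Int) + s.length < dr := by push_cast at hlt ⊢; omega
      have := h (j + 1) (by simpa using Nat.succ_lt_succ hj) this
      simpa using this

-- an element equal to a appears no earlier than idxOf a
lemma pvIdxOf_le (l : List Int) (a : Int) (j : Nat) (hjl : j < l.length) (h : l[j] = a) :
    l.idxOf a ≤ j := by
  induction l generalizing j with
  | nil => simp at hjl
  | cons x t ih =>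
    cases j with
    | zero => simp at h; simp [h, List.idxOf_cons_self]
    | succ j =>
      by_cases hx : x = a
      · simp [hx, List.idxOf_cons_self]
      · rw [List.idxOf_cons_ne t hx]
        exact Nat.succ_le_succ (ih j (by simpa using hjl) (by simpa using h))

lemma pvBankB_eq_greedy : ∀ (k : Nat) (ds : List Int), (∀ x ∈ ds, 0 ≤ x) → k ≤ ds.length →
    ((pvBankB ds ((ds.length : Int) - k)).1.reverse.take k) = pvGreedy ds k := by
  intro k
  induction k with
  | zero => intro ds _ _; simp [pvGreedy]
  | succ k ih =>
    intro ds h0 hk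
    have hwlen : (ds.take (ds.length - k)).length = ds.length - k := by
      simp
    have hwne : 0 < (ds.take (ds.length - k)).length := by omega
    set n := ds.length with hn
    set w := ds.take (n - k) with hw
    set M := w.foldl max (-1) with hM
    have hmax := PySem.List.le_foldl_max w (-1)
    have hMw : M ∈ w := by
      rcases PySem.List.foldl_max_mem w (-1) with h | h
      · exfalso
        have hmem0 : w[0] ∈ w := List.getElem_mem hwne
        have h01 : (0:Int) ≤ w[0] := h0 _ (List.mem_of_mem_take hmem0)
        have h2 := hmax.2 w[0] hmem0
        rw [h] at h2
        omega
      · exact h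
    set m := w.idxOf M with hm
    have hmlt : m < w.length := List.idxOf_lt_length_of_mem hMw
    have hmn : m < n - k := by omega
    have hmn' : m < n := by omega
    have hdsm : ds[m]'hmn' = M := by
      have h1 : w[m]'hmlt = M := List.getElem_idxOf hmlt
      simp only [hw, List.getElem_take] at h1
      exact h1
    have hds : ds = (ds.take m ++ [M]) ++ ds.drop (m+1) := by
      rw [← List.append_cons, ← hdsm, List.getElem_cons_drop, List.take_append_drop]
    have hprelt : ∀ x ∈ ds.take m, x < M := by
      intro x hx
      rcases List.mem_take_iff_getElem.1 hx with ⟨j, hj, hxj⟩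
      have hjm : j < m := by omega
      have hjw : j < w.length := by omega
      have hwj : w[j]'hjw = x := by simp only [hw, List.getElem_take]; exact hxj
      have hle : x ≤ M := hmax.2 x (hwj ▸ List.getElem_mem hjw)
      have hne : x ≠ M := by
        intro heq
        have := pvIdxOf_le w M j hjw (by rw [hwj, heq])
        omega
      exact lt_of_le_of_ne hle hne
    -- run the fold over the decomposition
    have hrun : pvBankB ds ((n : Int) - (k+1))
        = ((pvBankB (ds.drop (m+1)) ((n : Int) - (k+1) - m)).1 ++ [M],
           (pvBankB (ds.drop (m+1)) ((n : Int) - (k+1) - m)).2) := by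
      rw [pvBankB]
      conv_lhs => rw [hds]
      rw [List.foldl_append]
      have hpre : (ds.take m ++ [M]).foldl (fun st d => pvPopPush d st.1 st.2) ([], (n : Int) - (k+1))
          = ([M], (n : Int) - (k+1) - m) := by
        have := pvRun_prefix (ds.take m) M ((n : Int) - (k+1)) hprelt
          (by
            have : (ds.take m).length = m := by simp; omega
            rw [this]; omega)
        rw [this]
        have : ((ds.take m).length : Int) = m := by simp; omega
        rw [this]
      rw [hpre]
      have hbot := pvRun_bottom M (ds.drop (m+1)) [] ((n : Int) - (k+1) - m)
        (by
          intro j hj hlt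
          simp only [List.length_nil, Nat.cast_zero, add_zero] at hlt
          have hjlen : j < (ds.drop (m+1)).length := hj
          have hidx : m + 1 + j < n := by
            have : (ds.drop (m+1)).length = n - (m+1) := by simp [hn]
            omega
          have hidxw : m + 1 + j < w.length := by
            have : (j : Int) < (n : Int) - (k+1) - m := hlt
            have : j < n - k - m - 1 := by omega
            omega
          have : (ds.drop (m+1))[j] = ds[m+1+j]'hidx := List.getElem_drop
          rw [this]
          have hweq : w[m+1+j]'hidxw = ds[m+1+j]'hidx := by
            simp only [hw, List.getElem_take]
          rw [← hweq]
          exact hmax.2 _ (List.getElem_mem hidxw))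
      simpa [pvBankB] using hbot
    push_cast
    rw [hrun]
    simp only [List.reverse_append, List.reverse_cons, List.reverse_nil, List.nil_append,
      List.cons_append, List.take_succ_cons]
    have hdroplen : (ds.drop (m+1)).length = n - (m+1) := by simp [hn]
    have hbudget : ((ds.drop (m+1)).length : Int) - k = (n : Int) - (k+1) - m := by
      rw [hdroplen]; omega
    have hih := ih (ds.drop (m+1)) (fun x hx => h0 x (List.mem_of_mem_drop hx)) (by omega)
    rw [hbudget] at hih
    rw [hih]
    conv_rhs => rw [pvGreedy]

-- — plumbing —
lemma pvDigits_nonneg (bank : String) : ∀ x ∈ pvDigits bank, 0 ≤ x := by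
  intro x hx
  simp only [pvDigits, List.mem_map, List.mem_filter] at hx
  obtain ⟨c, ⟨_, hdig⟩, hval⟩ := hx
  simp only [PySem.Chars.isdigit, Bool.and_eq_true, decide_eq_true_eq, Char.le_def] at hdig
  have h1 : 48 ≤ c.toNat := hdig.1
  omega

lemma pvStep_eq (t : Int) (bank : String) (k : Int) (hk : 1 ≤ k) :
    pvStepA k t bank = pvStepB k t bank := by
  simp only [pvStepA, pvStepB]
  set ds := pvDigits bank with hds
  split_ifs with h1 h2 h2
  · rfl
  · omega
  · omega
  · have h0 : ∀ x ∈ ds, 0 ≤ x := by rw [hds]; exact pvDigits_nonneg bank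
    have hkn : k.toNat ≤ ds.length := by omega
    have hA := pvBankA_eq_greedy ds k h0 (by omega) (by omega)
    have hB := pvBankB_eq_greedy k.toNat ds h0 hkn
    rw [show ((k.toNat : Nat) : Int) = k by omega] at hB
    have hlist : pvBankA ds k
        = PySem.List.slice (pvBankB ds ((ds.length : Int) - k)).1.reverse none (some k) := by
      rw [PySem.List.slice_to _ (by omega : (0:Int) ≤ k)]
      rw [hA, ← hB]
    rw [hlist]

lemma pvFold_eq (k : Int) (hk : 1 ≤ k) : ∀ (banks : List String) (t : Int),
    banks.foldl (pvStepA k) t = banks.foldl (pvStepB k) t := by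
  intro banks
  induction banks with
  | nil => intro t; rfl
  | cons bank rest ih =>
    intro t
    simp only [List.foldl_cons]
    rw [pvStep_eq t bank k hk]
    exact ih _

-- ===== VERDICT (by name: the statement is the Claim_ definition above) =====
theorem solve_spec : Claim_equal_solve := by
  intro banks num_digits _ hpre
  unfold Spec_solve solve solve_alt
  rcases hpre with hk | hnil
  · exact pvFold_eq num_digits hk banks 0
  · rw [hnil]; rfl
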